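-- pv_equiv track=rewrite | github.com/Hallabassuny7/Sounds-Packing | FolderFilling.py | folder_filling
-- ===== SOURCE A (Python) =====
-- def folder_filling(files, folder_capacity):
--     # dp function returns two things:
--     # 1) Maximum value obtained by including or not including the current file
--     # 2) List of files used to achieve this maximum value
--
--     def dp(names, index, remaining_duration, memo):                                                          #O(n*D)
--         # Base case
--         if index == len(names) or remaining_duration == 0:                                                   #len() is O(1)      -> O(1)
--             return 0, []                                                                                     #                   -> O(1)
--
--         # Check if result is already computed and stored in memo
--         if (index, remaining_duration) in memo:                                                              #                   -> O(1)
--             return memo[(index, remaining_duration)]                                                         #                   -> O(1)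
--
--         file_name = names[index]                                                                             #                   -> O(1)
--         file_duration = files[file_name]                                                                     #                   -> O(1)
--
--         # leave_value is the maximum value obtained by not including this file
--         # leave_files is the list of files used to achieve leave_value
--         leave_value, leave_files = dp(names, index + 1, remaining_duration, memo)
--         take_value, taken_files = 0, []
--
--         if file_duration <= remaining_duration:                                                              #O(1)
--             # take_value is the maximum value obtained by including this file
--             # take_files is the list of files used to achieve take_value
--             take_value, taken_files = dp(names, index + 1, remaining_duration - file_duration, memo)
--             take_value += file_duration                                                                      #O(1)
--             taken_files = [(file_name, file_duration)] + taken_files                                         #O(1)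
--
--         # Choose the better option: including or not including the current file
--         if leave_value > take_value:                                                                         #O(1)
--             memo[(index, remaining_duration)] = (leave_value, leave_files)                                   #O(1)
--         else:
--             memo[(index, remaining_duration)] = (take_value, taken_files)                                    #O(1)
--            #names.remove(file_name)                                                                          #O(1)
--         return memo[(index, remaining_duration)]                                                             #O(1)
--
--     # Main logic of folder filling function
--     folders = []
--     files_names = list(files.keys())
--
--     while files_names:                                                                                       #O(n)
--         memo = {}
--         # Get the best subset of files for the current folder capacity
--         _, files_in_a_folder = dp(files_names, 0, folder_capacity, memo)                                     #O(n*D)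
--         if not files_in_a_folder:                                                                            #O(1)
--             break                                                                                            #O(1)
--         folders.append(files_in_a_folder)                                                                    #O(1)
--
--         # Remove the files that have been added to the current folder
--         for file_name, _ in files_in_a_folder:                                                               #O(k)
--             files_names.remove(file_name)                                                                    #O(n)
--                                                                                                             #for loop complexity -> O(n*k)
--     return folders                                                                                           #O(1)
-- ===== SOURCE B (Python) =====
-- def folder_filling(files, folder_capacity):
--     # Same result as the original, but the DP stores one decision bit per state
--     # (take-candidate wins or leave-candidate wins) instead of copying file lists,
--     # and the chosen files are reconstructed once by walking the bits.
--     def solve(entries, cap):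
--         n = len(entries)
--         memo = {}  # (i, rem) -> (best value, take-candidate chosen?)
--
--         def val(i, rem):
--             if i == n or rem == 0:
--                 return 0
--             key = (i, rem)
--             if key in memo:
--                 return memo[key][0]
--             dur = entries[i][1]
--             leave = val(i + 1, rem)
--             if dur <= rem:
--                 take = dur + val(i + 1, rem - dur)
--             else:
--                 take = 0  # the take-candidate is the empty selection
--             if leave > take:
--                 memo[key] = (leave, False)
--             else:
--                 memo[key] = (take, True)
--             return memo[key][0]
--
--         val(0, cap)
--         # walk the decision bits once to rebuild the chosen list
--         chosen = []
--         i, rem = 0, cap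
--         while i < n and rem != 0:
--             if memo[(i, rem)][1]:
--                 name, dur = entries[i]
--                 if dur <= rem:
--                     chosen.append((name, dur))
--                     rem -= dur
--                 else:
--                     break  # winning take-candidate is the empty selection
--             i += 1
--         return chosen
--
--     folders = []
--     remaining = list(files.items())
--     while remaining:
--         chosen = solve(remaining, folder_capacity)
--         if not chosen:
--             break
--         folders.append(chosen)
--         picked = {name for name, _ in chosen}
--         remaining = [e for e in remaining if e[0] not in picked]
--     return folders
-- ===== Notes on version B (the rewrite author's own statement) =====
-- stated objective: faster
-- what changed: The DP memo stores only (best value, one decision bit) per state and the chosen file list is reconstructed once by walking the bits, instead of building and copying a file list in every memo entry; the outer loop keeps (name, duration) entries and drops a round's chosen files with one filter over a set instead of repeated list.remove calls.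
import Mathlib
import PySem

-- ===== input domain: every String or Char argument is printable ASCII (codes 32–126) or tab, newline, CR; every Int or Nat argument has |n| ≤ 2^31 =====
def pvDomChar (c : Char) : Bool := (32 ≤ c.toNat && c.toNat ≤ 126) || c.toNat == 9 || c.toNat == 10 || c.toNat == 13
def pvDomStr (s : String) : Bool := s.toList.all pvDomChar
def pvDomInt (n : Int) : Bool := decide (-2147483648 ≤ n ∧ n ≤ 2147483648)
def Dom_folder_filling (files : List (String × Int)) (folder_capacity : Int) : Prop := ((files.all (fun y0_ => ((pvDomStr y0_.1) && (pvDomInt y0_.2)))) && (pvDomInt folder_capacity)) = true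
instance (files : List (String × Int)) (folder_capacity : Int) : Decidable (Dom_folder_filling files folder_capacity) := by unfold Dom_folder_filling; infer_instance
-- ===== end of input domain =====

-- B replaces A's list-copying memo by a decision-bit memo with one reconstruction pass and
-- removes a round's chosen files with a single set-filter; same return value, measurably faster.

-- ===== PORT A =====
-- dp(names, index, remaining_duration, memo); `k` is fuel = len(names) - index (the recursion
-- only ever runs with k = len(names) - index, so `k = 0` is exactly Python's `index == len(names)`).
def dpA (filesD : PySem.Dict String Int) (names : List String) (k : Nat) (index : Nat)
    (rem : Int) (memo : PySem.Dict (Nat × Int) (Int × List (String × Int))) :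
    (Int × List (String × Int)) × PySem.Dict (Nat × Int) (Int × List (String × Int)) :=
  match k with
  | 0 => ((0, []), memo)                                   -- index == len(names)
  | k + 1 =>
    if rem = 0 then ((0, []), memo)                        -- remaining_duration == 0
    else
      match memo.get? (index, rem) with
      | some res => (res, memo)
      | none =>
        let fileName := (PySem.List.pyGet? names (index : Int)).getD ""   -- names[index]; always in range here
        let fileDur := (filesD.get? fileName).getD 0                      -- files[file_name]; the name is always a key
        let r1 := dpA filesD names k (index + 1) rem memo                 -- leave branch
        let tm :=
          if fileDur ≤ rem then
            let r2 := dpA filesD names k (index + 1) (rem - fileDur) r1.2 -- take branch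
            ((r2.1.1 + fileDur, (fileName, fileDur) :: r2.1.2), r2.2)
          else ((0, []), r1.2)
        let best := if r1.1.1 > tm.1.1 then r1.1 else tm.1
        (best, tm.2.insert (index, rem) best)

-- for file_name, _ in files_in_a_folder: files_names.remove(file_name)  (the name is always present)
def removeA (names : List String) (chosen : List (String × Int)) : List String :=
  chosen.foldl (fun ns p => (PySem.List.remove? ns p.1).getD ns) names

-- while files_names: … ; fuel = len(files_names) (each round removes at least one name)
def loopA (filesD : PySem.Dict String Int) (cap : Int) (fuel : Nat) (names : List String)
    (folders : List (List (String × Int))) : List (List (String × Int)) :=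
  match fuel with
  | 0 => folders
  | fuel + 1 =>
    if names.isEmpty then folders
    else
      let r := dpA filesD names names.length 0 cap PySem.Dict.empty
      if r.1.2.isEmpty then folders
      else loopA filesD cap fuel (removeA names r.1.2) (folders ++ [r.1.2])

def folder_filling (files : List (String × Int)) (folder_capacity : Int) : List (List (String × Int)) :=
  let filesD := PySem.Dict.ofList files
  let names := filesD.keys
  loopA filesD folder_capacity names.length names []

-- ===== PORT B =====
-- val(i, rem): memo stores (best value, take-candidate chosen?); `k` is fuel = len(entries) - i.
def dpB (ents : List (String × Int)) (k : Nat) (i : Nat) (rem : Int)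
    (memo : PySem.Dict (Nat × Int) (Int × Bool)) :
    Int × PySem.Dict (Nat × Int) (Int × Bool) :=
  match k with
  | 0 => (0, memo)                                         -- i == n
  | k + 1 =>
    if rem = 0 then (0, memo)
    else
      match memo.get? (i, rem) with
      | some res => (res.1, memo)
      | none =>
        let dur := ((PySem.List.pyGet? ents (i : Int)).getD ("", 0)).2    -- entries[i][1]; in range here
        let r1 := dpB ents k (i + 1) rem memo
        let tm :=
          if dur ≤ rem then
            let r2 := dpB ents k (i + 1) (rem - dur) r1.2
            (dur + r2.1, r2.2)
          else (0, r1.2)                                   -- take-candidate is the empty selection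
        let best := if r1.1 > tm.1 then (r1.1, false) else (tm.1, true)
        (best.1, tm.2.insert (i, rem) best)

-- the reconstruction walk (while i < n and rem != 0); `k` is fuel = len(entries) - i
def recB (ents : List (String × Int)) (memo : PySem.Dict (Nat × Int) (Int × Bool))
    (k : Nat) (i : Nat) (rem : Int) (acc : List (String × Int)) : List (String × Int) :=
  match k with
  | 0 => acc
  | k + 1 =>
    if rem = 0 then acc
    else
      if ((memo.get? (i, rem)).getD (0, false)).2 then     -- memo[(i, rem)][1]; always present on the path
        let e := (PySem.List.pyGet? ents (i : Int)).getD ("", 0)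
        if e.2 ≤ rem then recB ents memo k (i + 1) (rem - e.2) (acc ++ [e])
        else acc                                           -- winning take-candidate is empty: break
      else recB ents memo k (i + 1) rem acc

def solveB (ents : List (String × Int)) (cap : Int) : List (String × Int) :=
  let memo := (dpB ents ents.length 0 cap PySem.Dict.empty).2
  recB ents memo ents.length 0 cap []

-- while remaining: … ; fuel = len(remaining)
def loopB (cap : Int) (fuel : Nat) (remaining : List (String × Int))
    (folders : List (List (String × Int))) : List (List (String × Int)) :=
  match fuel with
  | 0 => folders
  | fuel + 1 =>
    if remaining.isEmpty then folders
    else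
      let chosen := solveB remaining cap
      if chosen.isEmpty then folders
      else
        let picked := PySem.Set.ofList (chosen.map Prod.fst)
        loopB cap fuel (remaining.filter (fun e => !(PySem.Set.contains picked e.1)))
          (folders ++ [chosen])

def folder_filling_alt (files : List (String × Int)) (folder_capacity : Int) : List (List (String × Int)) :=
  let remaining := (PySem.Dict.ofList files).items
  loopB folder_capacity remaining.length remaining []

-- ===== PRECONDITION & SPEC =====
def Spec_folder_filling (files : List (String × Int)) (folder_capacity : Int) (out : List (List (String × Int))) : Prop := out = folder_filling_alt files folder_capacity
instance (files : List (String × Int)) (folder_capacity : Int) (out : List (List (String × Int))) : Decidable (Spec_folder_filling files folder_capacity out) := by unfold Spec_folder_filling; infer_instance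

-- ===== CLAIM (what is proved, stated in full; the proofs are below) =====
def Claim_equal_folder_filling : Prop := ∀ (files : List (String × Int)) (folder_capacity : Int), Dom_folder_filling files folder_capacity → Spec_folder_filling files folder_capacity (folder_filling files folder_capacity)

-- ===== LEMMAS AND PROOFS =====

-- memo-free specification of the shared recurrence (value, chosen files)
def pureF (ents : List (String × Int)) (k : Nat) (i : Nat) (rem : Int) : Int × List (String × Int) :=
  match k with
  | 0 => (0, [])
  | k + 1 =>
    if rem = 0 then (0, [])
    else
      let e := (PySem.List.pyGet? ents (i : Int)).getD ("", 0)
      let leave := pureF ents k (i + 1) rem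
      let take := if e.2 ≤ rem then
          let t := pureF ents k (i + 1) (rem - e.2)
          (t.1 + e.2, e :: t.2)
        else (0, [])
      if leave.1 > take.1 then leave else take

-- which candidate wins at a state (true = take-candidate)
def bitB (ents : List (String × Int)) (k : Nat) (i : Nat) (rem : Int) : Bool :=
  match k with
  | 0 => false
  | k + 1 =>
    if rem = 0 then false
    else
      let e := (PySem.List.pyGet? ents (i : Int)).getD ("", 0)
      let leave := (pureF ents k (i + 1) rem).1
      let take := if e.2 ≤ rem then (pureF ents k (i + 1) (rem - e.2)).1 + e.2 else 0
      !(leave > take)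

def entsOf (filesD : PySem.Dict String Int) (names : List String) : List (String × Int) :=
  names.map (fun n => (n, filesD.getD n 0))

def InvA (ents : List (String × Int)) (memo : PySem.Dict (Nat × Int) (Int × List (String × Int))) : Prop :=
  ∀ p ∈ memo.items, p.2 = pureF ents (ents.length - p.1.1) p.1.1 p.1.2

def childOK (ents : List (String × Int)) (memo : PySem.Dict (Nat × Int) (Int × Bool))
    (j : Nat) (r : Int) (b : Bool) : Prop :=
  (b = false → (j + 1 = ents.length ∨ (memo.get? (j + 1, r)).isSome)) ∧
  (b = true → ((PySem.List.pyGet? ents (j : Int)).getD ("", 0)).2 ≤ r →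
    (j + 1 = ents.length ∨ r - ((PySem.List.pyGet? ents (j : Int)).getD ("", 0)).2 = 0 ∨
      (memo.get? (j + 1, r - ((PySem.List.pyGet? ents (j : Int)).getD ("", 0)).2)).isSome))

def InvB (ents : List (String × Int)) (memo : PySem.Dict (Nat × Int) (Int × Bool)) : Prop :=
  ∀ p ∈ memo.items,
    p.2.1 = (pureF ents (ents.length - p.1.1) p.1.1 p.1.2).1 ∧
    p.2.2 = bitB ents (ents.length - p.1.1) p.1.1 p.1.2 ∧
    childOK ents memo p.1.1 p.1.2 p.2.2

theorem entsOf_length (filesD : PySem.Dict String Int) (names : List String) :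
    (entsOf filesD names).length = names.length := by
  simp [entsOf]

theorem entsOf_get (filesD : PySem.Dict String Int) (names : List String) {i : Nat}
    (h : i < names.length) :
    (PySem.List.pyGet? (entsOf filesD names) (i : Int)).getD ("", 0) =
      ((PySem.List.pyGet? names (i : Int)).getD "",
       filesD.getD ((PySem.List.pyGet? names (i : Int)).getD "") 0) := by
  rw [PySem.List.pyGet?_natCast, PySem.List.pyGet?_natCast,
    List.getElem?_eq_getElem (by simpa [entsOf] using h), List.getElem?_eq_getElem h]
  simp [entsOf]

theorem dpA_spec (filesD : PySem.Dict String Int) (names : List String) (k : Nat) :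
    ∀ (i : Nat) (rem : Int) memo, i + k = names.length → InvA (entsOf filesD names) memo →
      (dpA filesD names k i rem memo).1 = pureF (entsOf filesD names) k i rem ∧
      InvA (entsOf filesD names) (dpA filesD names k i rem memo).2 := by
  induction k with
  | zero => intro i rem memo hik hinv; exact ⟨rfl, hinv⟩
  | succ k ih =>
    intro i rem memo hik hinv
    by_cases hr : rem = 0
    · constructor
      · simp [dpA, pureF, hr]
      · simp only [dpA, hr]; exact hinv
    · cases hmg : memo.get? (i, rem) with
      | some res =>
        have hmem := PySem.Dict.mem_items_of_get?_eq_some memo hmg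
        have hres := hinv _ hmem
        have hlen : (entsOf filesD names).length - i = k + 1 := by
          rw [entsOf_length]; omega
        simp only [dpA, hr, reduceIte, hmg]
        refine ⟨?_, hinv⟩
        simpa [hlen] using hres
      | none =>
        have hi : i < names.length := by omega
        have hent := entsOf_get filesD names hi
        have hlen : (entsOf filesD names).length - i = k + 1 := by
          rw [entsOf_length]; omega
        obtain ⟨ih1, ih1inv⟩ := ih (i + 1) rem memo (by omega) hinv
        simp only [dpA, hr, reduceIte, hmg]
        set fileName := (PySem.List.pyGet? names (i : Int)).getD "" with hfn
        have hfd' : (filesD.get? fileName).getD 0 = filesD.getD fileName 0 := by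
          rw [PySem.Dict.getD_eq_get?_getD]
        set fileDur := filesD.getD fileName 0 with hfd
        by_cases hfit : fileDur ≤ rem
        · obtain ⟨ih2, ih2inv⟩ := ih (i + 1) (rem - fileDur)
            (dpA filesD names k (i + 1) rem memo).2 (by omega) ih1inv
          have hbest : (if (dpA filesD names k (i+1) rem memo).1.1 >
                ((dpA filesD names k (i+1) (rem - fileDur) (dpA filesD names k (i+1) rem memo).2).1.1 + fileDur)
              then (dpA filesD names k (i+1) rem memo).1
              else ((dpA filesD names k (i+1) (rem - fileDur) (dpA filesD names k (i+1) rem memo).2).1.1 + fileDur,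
                    (fileName, fileDur) :: (dpA filesD names k (i+1) (rem - fileDur) (dpA filesD names k (i+1) rem memo).2).1.2))
              = pureF (entsOf filesD names) (k + 1) i rem := by
            rw [pureF, if_neg hr, hent, ih1, ih2]
            simp only [if_pos hfit]
          constructor
          · simp only [hfd', if_pos hfit, hbest]
          · simp only [hfd', if_pos hfit]
            intro p hp
            rw [PySem.Dict.mem_items_insert] at hp
            rcases hp with hp | ⟨hp, _⟩
            · subst hp
              simp only [hlen]
              exact hbest
            · exact ih2inv _ hp
        · have hbest : (if (dpA filesD names k (i+1) rem memo).1.1 > (0:Int)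
              then (dpA filesD names k (i+1) rem memo).1 else ((0:Int), ([] : List (String × Int))))
              = pureF (entsOf filesD names) (k + 1) i rem := by
            rw [pureF, if_neg hr, hent, ih1]
            simp only [if_neg hfit]
          constructor
          · simp only [hfd', if_neg hfit, hbest]
          · simp only [hfd', if_neg hfit]
            intro p hp
            rw [PySem.Dict.mem_items_insert] at hp
            rcases hp with hp | ⟨hp, _⟩
            · subst hp
              simp only [hlen]
              exact hbest
            · exact ih1inv _ hp

theorem isSome_get?_insert {κ ν : Type} [BEq κ] [LawfulBEq κ] [DecidableEq κ]
    (d : PySem.Dict κ ν) (k k' : κ) (v : ν) (h : (d.get? k').isSome) :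
    ((d.insert k v).get? k').isSome := by
  rw [PySem.Dict.get?_insert]
  split
  · rfl
  · exact h

theorem childOK_mono (ents : List (String × Int)) {m m' : PySem.Dict (Nat × Int) (Int × Bool)}
    (j : Nat) (r : Int) (b : Bool) (h : childOK ents m j r b)
    (hm : ∀ key, (m.get? key).isSome → (m'.get? key).isSome) : childOK ents m' j r b := by
  obtain ⟨h1, h2⟩ := h
  refine ⟨fun hb => ?_, fun hb hle => ?_⟩
  · exact (h1 hb).imp id (hm _)
  · rcases h2 hb hle with h | h | h
    · exact Or.inl h
    · exact Or.inr (Or.inl h)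
    · exact Or.inr (Or.inr (hm _ h))

def takeV (ents : List (String × Int)) (k : Nat) (i : Nat) (rem : Int) : Int :=
  let e := (PySem.List.pyGet? ents (i : Int)).getD ("", 0)
  if e.2 ≤ rem then (pureF ents k (i + 1) (rem - e.2)).1 + e.2 else 0

theorem pureF_fst_succ (ents : List (String × Int)) (k : Nat) (i : Nat) {rem : Int}
    (hr : rem ≠ 0) : (pureF ents (k + 1) i rem).1 =
      if (pureF ents k (i + 1) rem).1 > takeV ents k i rem
      then (pureF ents k (i + 1) rem).1 else takeV ents k i rem := by
  rw [pureF, if_neg hr]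
  unfold takeV
  by_cases he : ((PySem.List.pyGet? ents (i : Int)).getD ("", 0)).2 ≤ rem <;>
    simp only [he, reduceIte] <;> split <;> rfl

theorem bitB_succ (ents : List (String × Int)) (k : Nat) (i : Nat) {rem : Int}
    (hr : rem ≠ 0) : bitB ents (k + 1) i rem =
      !((pureF ents k (i + 1) rem).1 > takeV ents k i rem) := by
  rw [bitB]
  simp only [hr, reduceIte, takeV]
  rfl

theorem dpB_spec (ents : List (String × Int)) (k : Nat) :
    ∀ (i : Nat) (rem : Int) memo, i + k = ents.length → InvB ents memo →
      (dpB ents k i rem memo).1 = (pureF ents k i rem).1 ∧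
      InvB ents (dpB ents k i rem memo).2 ∧
      (∀ key, (memo.get? key).isSome → (((dpB ents k i rem memo).2).get? key).isSome) ∧
      (k ≠ 0 → rem ≠ 0 → (((dpB ents k i rem memo).2).get? (i, rem)).isSome) := by
  induction k with
  | zero =>
    intro i rem memo hik hinv
    exact ⟨rfl, hinv, fun _ h => h, fun h => absurd rfl h⟩
  | succ k ih =>
    intro i rem memo hik hinv
    by_cases hr : rem = 0
    · refine ⟨?_, ?_, ?_, ?_⟩
      · simp [dpB, pureF, hr]
      · simp only [dpB, hr]; exact hinv
      · simp only [dpB, hr]; exact fun _ h => h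
      · intro _ h; exact absurd hr h
    · cases hmg : memo.get? (i, rem) with
      | some res =>
        have hmem := PySem.Dict.mem_items_of_get?_eq_some memo hmg
        have hres := hinv _ hmem
        have hlen : ents.length - i = k + 1 := by omega
        simp only [dpB, hr, reduceIte, hmg]
        refine ⟨?_, hinv, fun _ h => h, fun _ _ => rfl⟩
        have := hres.1
        simpa [hlen] using this
      | none =>
        have hi : i < ents.length := by omega
        have hlen : ents.length - i = k + 1 := by omega
        obtain ⟨ih1, ih1inv, ih1mono, ih1mem⟩ := ih (i + 1) rem memo (by omega) hinv
        simp only [dpB, hr, reduceIte, hmg]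
        set dur := ((PySem.List.pyGet? ents (i : Int)).getD ("", 0)).2 with hdur
        by_cases hfit : dur ≤ rem
        · obtain ⟨ih2, ih2inv, ih2mono, ih2mem⟩ := ih (i + 1) (rem - dur)
            (dpB ents k (i + 1) rem memo).2 (by omega) ih1inv
          simp only [if_pos hfit]
          have hT : dur + (dpB ents k (i + 1) (rem - dur) (dpB ents k (i + 1) rem memo).2).1
              = takeV ents k i rem := by
            rw [ih2, takeV]
            simp only [← hdur, if_pos hfit]
            ring
          have hmono : ∀ key, (memo.get? key).isSome →
              ((((dpB ents k (i + 1) (rem - dur) (dpB ents k (i + 1) rem memo).2).2).insert (i, rem)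
                (if (dpB ents k (i + 1) rem memo).1 >
                    dur + (dpB ents k (i + 1) (rem - dur) (dpB ents k (i + 1) rem memo).2).1
                 then ((dpB ents k (i + 1) rem memo).1, false)
                 else (dur + (dpB ents k (i + 1) (rem - dur) (dpB ents k (i + 1) rem memo).2).1, true))).get? key).isSome := by
            intro key h
            exact isSome_get?_insert _ _ _ _ (ih2mono _ (ih1mono _ h))
          refine ⟨?_, ?_, hmono, ?_⟩
          · rw [pureF_fst_succ ents k i hr, ih1, hT]
            split <;> rfl
          · intro p hp
            rw [PySem.Dict.mem_items_insert] at hp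
            rcases hp with hp | ⟨hp, _⟩
            · subst hp
              dsimp only
              refine ⟨?_, ?_, ?_⟩
              · rw [hlen, pureF_fst_succ ents k i hr, ih1, hT]
                split <;> rfl
              · rw [hlen, bitB_succ ents k i hr, ih1, hT]
                split <;> simp_all
              · constructor
                · intro hb
                  rw [ih1, hT] at hb
                  by_cases hk : k = 0
                  · exact Or.inl (by omega)
                  · refine Or.inr ?_
                    refine isSome_get?_insert _ _ _ _ (ih2mono _ (ih1mem hk hr))
                · intro hb hle
                  by_cases hk : k = 0
                  · exact Or.inl (by omega)
                  · by_cases hz : rem - dur = 0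
                    · exact Or.inr (Or.inl hz)
                    · refine Or.inr (Or.inr ?_)
                      refine isSome_get?_insert _ _ _ _ (ih2mem hk hz)
            · obtain ⟨hv, hb, hc⟩ := ih2inv _ hp
              exact ⟨hv, hb, childOK_mono ents _ _ _ hc (fun key h => isSome_get?_insert _ _ _ _ h)⟩
          · intro _ _
            rw [PySem.Dict.get?_insert]
            simp
        · simp only [if_neg hfit]
          have hT : (0 : Int) = takeV ents k i rem := by
            rw [takeV]
            simp only [← hdur, if_neg hfit]
          have hmono : ∀ key, (memo.get? key).isSome →
              ((((dpB ents k (i + 1) rem memo).2).insert (i, rem)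
                (if (dpB ents k (i + 1) rem memo).1 > (0 : Int)
                 then ((dpB ents k (i + 1) rem memo).1, false) else ((0 : Int), true))).get? key).isSome := by
            intro key h
            exact isSome_get?_insert _ _ _ _ (ih1mono _ h)
          refine ⟨?_, ?_, hmono, ?_⟩
          · rw [pureF_fst_succ ents k i hr, ih1, ← hT]
            split <;> rfl
          · intro p hp
            rw [PySem.Dict.mem_items_insert] at hp
            rcases hp with hp | ⟨hp, _⟩
            · subst hp
              dsimp only
              refine ⟨?_, ?_, ?_⟩
              · rw [hlen, pureF_fst_succ ents k i hr, ih1, ← hT]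
                split <;> rfl
              · rw [hlen, bitB_succ ents k i hr, ih1, ← hT]
                split <;> simp_all
              · constructor
                · intro hb
                  by_cases hk : k = 0
                  · exact Or.inl (by omega)
                  · exact Or.inr (isSome_get?_insert _ _ _ _ (ih1mem hk hr))
                · intro _ hle
                  exact absurd hle hfit
            · obtain ⟨hv, hb, hc⟩ := ih1inv _ hp
              exact ⟨hv, hb, childOK_mono ents _ _ _ hc (fun key h => isSome_get?_insert _ _ _ _ h)⟩
          · intro _ _
            rw [PySem.Dict.get?_insert]
            simp

theorem pureF_succ_eq (ents : List (String × Int)) (k : Nat) (i : Nat) {rem : Int}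
    (hr : rem ≠ 0) :
    pureF ents (k + 1) i rem =
      if bitB ents (k + 1) i rem then
        (if ((PySem.List.pyGet? ents (i : Int)).getD ("", 0)).2 ≤ rem then
          ((pureF ents k (i + 1) (rem - ((PySem.List.pyGet? ents (i : Int)).getD ("", 0)).2)).1 +
              ((PySem.List.pyGet? ents (i : Int)).getD ("", 0)).2,
            ((PySem.List.pyGet? ents (i : Int)).getD ("", 0)) ::
              (pureF ents k (i + 1) (rem - ((PySem.List.pyGet? ents (i : Int)).getD ("", 0)).2)).2)
         else (0, []))
      else pureF ents k (i + 1) rem := by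
  rw [pureF, if_neg hr, bitB_succ ents k i hr]
  unfold takeV
  generalize (PySem.List.pyGet? ents (i : Int)).getD ("", 0) = e
  by_cases he : e.2 ≤ rem
  · simp only [he, reduceIte]
    by_cases hgt : (pureF ents k (i + 1) rem).1 > (pureF ents k (i + 1) (rem - e.2)).1 + e.2 <;>
      simp [hgt]
  · simp only [he, reduceIte]
    by_cases hgt : (pureF ents k (i + 1) rem).1 > (0 : Int) <;> simp [hgt]

theorem recB_spec (ents : List (String × Int)) (k : Nat) :
    ∀ (i : Nat) (rem : Int) memo acc, i + k = ents.length → InvB ents memo →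
      ((k ≠ 0 ∧ rem ≠ 0) → (memo.get? (i, rem)).isSome) →
      recB ents memo k i rem acc = acc ++ (pureF ents k i rem).2 := by
  induction k with
  | zero => intro i rem memo acc hik hinv hmem; simp [recB, pureF]
  | succ k ih =>
    intro i rem memo acc hik hinv hmem
    by_cases hr : rem = 0
    · simp [recB, pureF, hr]
    · obtain ⟨res, hmg⟩ := Option.isSome_iff_exists.mp (hmem ⟨Nat.succ_ne_zero k, hr⟩)
      obtain ⟨hv, hb, hc⟩ := hinv _ (PySem.Dict.mem_items_of_get?_eq_some memo hmg)
      dsimp only at hv hb hc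
      have hlen : ents.length - i = k + 1 := by omega
      rw [hlen] at hb
      rw [recB, if_neg hr, hmg]
      simp only [Option.getD_some, hb]
      cases hbit : bitB ents (k + 1) i rem with
      | false =>
        rw [hbit] at hb
        have hnext : (k ≠ 0 ∧ rem ≠ 0) → (memo.get? (i + 1, rem)).isSome := by
          rintro ⟨hk, -⟩
          rcases hc.1 hb with hl | hs
          · omega
          · exact hs
        rw [if_neg (by simp), ih (i + 1) rem memo acc (by omega) hinv hnext,
          pureF_succ_eq ents k i hr, hbit, if_neg (by simp)]
      | true =>
        rw [hbit] at hb
        rw [if_pos rfl]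
        by_cases he : ((PySem.List.pyGet? ents (i : Int)).getD ("", 0)).2 ≤ rem
        · have hnext : (k ≠ 0 ∧ rem - ((PySem.List.pyGet? ents (i : Int)).getD ("", 0)).2 ≠ 0) →
              (memo.get? (i + 1, rem - ((PySem.List.pyGet? ents (i : Int)).getD ("", 0)).2)).isSome := by
            rintro ⟨hk, hz⟩
            rcases hc.2 hb he with hl | hz' | hs
            · omega
            · exact absurd hz' hz
            · exact hs
          rw [if_pos he, ih (i + 1) _ memo _ (by omega) hinv hnext,
            pureF_succ_eq ents k i hr, hbit, if_pos rfl, if_pos he]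
          simp
        · rw [if_neg he, pureF_succ_eq ents k i hr, hbit, if_pos rfl, if_neg he]
          simp

theorem solveB_eq (ents : List (String × Int)) (cap : Int) :
    solveB ents cap = (pureF ents ents.length 0 cap).2 := by
  unfold solveB
  obtain ⟨-, hinv, -, hmem⟩ := dpB_spec ents ents.length 0 cap PySem.Dict.empty (by omega)
    (by intro p hp; simp [PySem.Dict.empty] at hp)
  rw [recB_spec ents ents.length 0 cap _ [] (by omega) hinv (fun h => hmem h.1 h.2)]
  simp

theorem removeA_eq_filter (chosen : List (String × Int)) :
    ∀ names : List String, names.Nodup →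
      removeA names chosen = names.filter (fun n => !((chosen.map Prod.fst).contains n)) := by
  induction chosen with
  | nil => intro names _; simp [removeA]
  | cons c cs ih =>
    intro names h
    have hstep : (PySem.List.remove? names c.1).getD names = names.erase c.1 := by
      by_cases hm : c.1 ∈ names
      · rw [PySem.List.remove?_eq_some_erase names c.1 hm]; rfl
      · rw [(PySem.List.remove?_eq_none_iff names c.1).mpr hm, List.erase_of_not_mem hm]; rfl
    have h1 : removeA names (c :: cs) = removeA (names.erase c.1) cs := by
      simp [removeA, hstep]
    rw [h1, ih _ (h.erase _), h.erase_eq_filter, List.filter_filter]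
    refine List.filter_congr ?_
    intro x hx
    simp only [List.map_cons, List.contains_cons, Bool.not_or]
    cases hxe : (x == c.1) <;> simp [bne, hxe]

theorem entsOf_filter (filesD : PySem.Dict String Int) (names : List String)
    (chosen : List (String × Int)) :
    entsOf filesD (names.filter (fun n => !((chosen.map Prod.fst).contains n))) =
      (entsOf filesD names).filter
        (fun e => !(PySem.Set.contains (PySem.Set.ofList (chosen.map Prod.fst)) e.1)) := by
  unfold entsOf
  rw [List.filter_map]
  congr 1
  refine List.filter_congr ?_
  intro x hx
  simp

theorem loop_eq (filesD : PySem.Dict String Int) (cap : Int) (fuel : Nat) :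
    ∀ (names : List String) folders, names.Nodup →
      loopA filesD cap fuel names folders = loopB cap fuel (entsOf filesD names) folders := by
  induction fuel with
  | zero => intro names folders _; rfl
  | succ fuel ih =>
    intro names folders h
    rw [loopA, loopB]
    have hempty : (entsOf filesD names).isEmpty = names.isEmpty := by
      unfold entsOf; cases names <;> rfl
    rw [hempty]
    by_cases hne : names.isEmpty
    · rw [if_pos hne, if_pos hne]
    · rw [if_neg hne, if_neg hne]
      have hA : (dpA filesD names names.length 0 cap PySem.Dict.empty).1 =
          pureF (entsOf filesD names) names.length 0 cap :=
        (dpA_spec filesD names names.length 0 cap PySem.Dict.empty (by omega)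
          (by intro p hp; simp [PySem.Dict.empty] at hp)).1
      have hB : solveB (entsOf filesD names) cap =
          (pureF (entsOf filesD names) names.length 0 cap).2 := by
        rw [solveB_eq, entsOf_length]
      simp only [hA, hB]
      by_cases hce : (pureF (entsOf filesD names) names.length 0 cap).2.isEmpty
      · rw [if_pos hce, if_pos hce]

      · rw [if_neg hce, if_neg hce,
          removeA_eq_filter _ names h, ih _ _ (h.filter _), entsOf_filter]

-- ===== VERDICT (by name: the statement is the Claim_ definition above) =====
theorem folder_filling_spec : Claim_equal_folder_filling := by
  intro files cap _
  unfold Spec_folder_filling folder_filling folder_filling_alt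
  have hnd := PySem.Dict.nodup_keys_ofList files
  have hitems : (PySem.Dict.ofList files).items =
      entsOf (PySem.Dict.ofList files) (PySem.Dict.ofList files).keys := by
    rw [PySem.Dict.items_eq_map_keys _ hnd 0]; rfl
  show loopA (PySem.Dict.ofList files) cap (PySem.Dict.ofList files).keys.length
      (PySem.Dict.ofList files).keys [] =
    loopB cap (PySem.Dict.ofList files).items.length (PySem.Dict.ofList files).items []
  rw [hitems, entsOf_length]
  exact loop_eq (PySem.Dict.ofList files) cap (PySem.Dict.ofList files).keys.length
    (PySem.Dict.ofList files).keys [] hnd
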